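-- pv_equiv track=rewrite | github.com/BrancoLab/FC_analysis | Processing/Processing_maze.py | get_arms_of_originandescape
-- ===== SOURCE A (Python) =====
-- def get_arms_of_originandescape(rois, outward=True): # TODO refactor
--     """ if outward get the last shelter roi and first threat otherwise first shelter and last threat in rois
--         Also if outward it gets the first arm after shelter and the last arm before threat else vicevers"""
--     if outward:
--         shelt =[i for i, x in enumerate(rois) if x == "Shelter_platform"]
--         if shelt: shelt = shelt[-1]
--         else: shelt = 0
--         if 'Threat_platform' in rois[shelt:]:
--             thrt = rois[shelt:].index('Threat_platform') + shelt
--         else: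
--             thrt = 0
--         try:
--             shelt_arm = rois[shelt+1]
--         except:
--             shelt_arm = rois[shelt]
--         threat_arm = rois[thrt-1]
--     else:
--         if 'Shelter_platform' in rois:
--             shelt = rois.index('Shelter_platform')
--             shelt_arm = rois[shelt - 1]
--         else:
--             shelt = False
--             shelt_arm = False
--         thrt = [i for i, x in enumerate(rois[:shelt]) if x == "Threat_platform"]
--         if thrt: thrt = thrt[-1]+1
--         else: thrt = len(rois)-1
--         threat_arm = rois[thrt]
--     return shelt, thrt, shelt_arm, threat_arm
-- ===== SOURCE B (Python) =====
-- def get_arms_of_originandescape(rois, outward=True):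
--     """Single pass over rois recording the needed shelter/threat indices,
--     then compute the four outputs from them (no slices or re-scans)."""
--     n = len(rois)
--     if outward:
--         last_shelter = None
--         threat_after = None  # first threat after the last shelter seen so far
--         for i, x in enumerate(rois):
--             if x == "Shelter_platform":
--                 last_shelter = i
--                 threat_after = None
--             elif x == "Threat_platform" and threat_after is None:
--                 threat_after = i
--         shelt = last_shelter if last_shelter is not None else 0
--         thrt = threat_after if threat_after is not None else 0
--         shelt_arm = rois[shelt + 1] if shelt + 1 < n else rois[shelt]
--         threat_arm = rois[thrt - 1] if thrt > 0 else rois[n - 1]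
--         return shelt, thrt, shelt_arm, threat_arm
--     first_shelter = None
--     last_threat_before = None  # last threat seen before the first shelter
--     for i, x in enumerate(rois):
--         if x == "Shelter_platform":
--             first_shelter = i
--             break
--         if x == "Threat_platform":
--             last_threat_before = i
--     if first_shelter is not None:
--         shelt = first_shelter
--         shelt_arm = rois[shelt - 1] if shelt > 0 else rois[n - 1]
--     else:
--         shelt = False
--         shelt_arm = False
--     if first_shelter is not None and last_threat_before is not None:
--         thrt = last_threat_before + 1
--     else:
--         thrt = n - 1
--     threat_arm = rois[thrt]
--     return shelt, thrt, shelt_arm, threat_arm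
-- ===== Notes on version B (the rewrite author's own statement) =====
-- stated objective: alternative
-- what changed: Replaces A's list-comprehension scans, slices and index()/membership re-scans with one forward pass per direction (with early break in the inward case) that records the needed shelter/threat indices, from which the four outputs are computed directly. Pre_ excludes the empty list (A raises IndexError) and inward calls without 'Shelter_platform' in rois, where A returns False sentinels outside the declared Optional types.
-- outside the precondition, e.g. on get_arms_of_originandescape([], True): A raises IndexError, B raises IndexError; on get_arms_of_originandescape([''], False): A returns (False, 0, False, ''), B returns (False, 0, False, '')
import Mathlib
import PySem

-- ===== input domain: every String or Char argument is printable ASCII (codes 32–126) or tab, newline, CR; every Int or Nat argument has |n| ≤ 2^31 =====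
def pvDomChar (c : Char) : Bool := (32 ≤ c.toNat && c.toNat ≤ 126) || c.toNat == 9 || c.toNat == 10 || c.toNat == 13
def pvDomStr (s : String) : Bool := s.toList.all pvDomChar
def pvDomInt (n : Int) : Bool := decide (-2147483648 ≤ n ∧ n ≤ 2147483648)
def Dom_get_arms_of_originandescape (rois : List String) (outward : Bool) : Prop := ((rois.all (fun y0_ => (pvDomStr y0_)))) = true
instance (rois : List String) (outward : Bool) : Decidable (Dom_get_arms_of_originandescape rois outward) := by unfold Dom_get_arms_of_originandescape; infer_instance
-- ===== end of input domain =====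

-- B replaces A's comprehensions, slices and index()/membership re-scans with one
-- forward pass per direction recording the needed shelter/threat indices (alternative
-- decomposition, same cost).  Python's False sentinels (Optional[int]/Optional[str]
-- slots) are rendered as `none`.

-- ===== PORT A =====
-- literal transliteration of A; the bare `except` fallback `rois[shelt]` re-raises
-- only on rois = [] (excluded by Pre_), so pyGetD's default is unreachable there
def get_arms_of_originandescape (rois : List String) (outward : Bool) : Option Int × Option Int × Option String × Option String :=
  if outward then
    -- shelt = [i for i, x in enumerate(rois) if x == "Shelter_platform"][-1] or 0
    let sheltList := ((PySem.List.enumerate rois 0).filter (fun p => p.2 == "Shelter_platform")).map (fun p => p.1)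
    let shelt : Int := match sheltList.getLast? with
      | some i => i
      | none => 0
    -- 'Threat_platform' in rois[shelt:] → rois[shelt:].index('Threat_platform') + shelt
    let tl := PySem.List.slice rois (some shelt) none
    let thrt : Int :=
      if "Threat_platform" ∈ tl then
        (match PySem.List.index? tl "Threat_platform" with | some k => (k : Int) | none => 0) + shelt
      else 0
    -- try rois[shelt+1] except rois[shelt]
    let shelt_arm : String := match PySem.List.pyGet? rois (shelt + 1) with
      | some v => v
      | none => PySem.List.pyGetD rois shelt ""
    let threat_arm : String := PySem.List.pyGetD rois (thrt - 1) ""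
    (some shelt, some thrt, some shelt_arm, some threat_arm)
  else
    if "Shelter_platform" ∈ rois then
      let shelt : Int := match PySem.List.index? rois "Shelter_platform" with
        | some k => (k : Int)
        | none => 0
      let shelt_arm : String := PySem.List.pyGetD rois (shelt - 1) ""
      -- thrt = [i for i, x in enumerate(rois[:shelt]) if x == "Threat_platform"]
      let pre := PySem.List.slice rois none (some shelt)
      let thrtList := ((PySem.List.enumerate pre 0).filter (fun p => p.2 == "Threat_platform")).map (fun p => p.1)
      let thrt : Int := match thrtList.getLast? with
        | some i => i + 1
        | none => (rois.length : Int) - 1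
      (some shelt, some thrt, some shelt_arm, some (PySem.List.pyGetD rois thrt ""))
    else
      -- shelt = False, shelt_arm = False; rois[:False] = rois[:0]
      let pre := PySem.List.slice rois none (some 0)
      let thrtList := ((PySem.List.enumerate pre 0).filter (fun p => p.2 == "Threat_platform")).map (fun p => p.1)
      let thrt : Int := match thrtList.getLast? with
        | some i => i + 1
        | none => (rois.length : Int) - 1
      (none, some thrt, none, some (PySem.List.pyGetD rois thrt ""))

-- ===== PORT B =====
-- outward pass: fold recording (last shelter index, first threat index after it)
def pvOutStep (st : Option Int × Option Int) (p : Int × String) : Option Int × Option Int :=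
  if p.2 == "Shelter_platform" then (some p.1, none)
  else if p.2 == "Threat_platform" && st.2 == none then (st.1, some p.1)
  else st

-- inward pass with early break at the first shelter: (first shelter, last threat before it)
def pvInScan : List String → Int → Option Int → Option Int × Option Int
  | [], _, lt => (none, lt)
  | x :: rest, i, lt =>
      if x == "Shelter_platform" then (some i, lt)
      else pvInScan rest (i + 1) (if x == "Threat_platform" then some i else lt)

def get_arms_of_originandescape_alt (rois : List String) (outward : Bool) : Option Int × Option Int × Option String × Option String :=
  let n : Int := rois.length
  if outward then
    let st := (PySem.List.enumerate rois 0).foldl pvOutStep (none, none)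
    let shelt : Int := st.1.getD 0
    let thrt : Int := st.2.getD 0
    let shelt_arm : String :=
      if shelt + 1 < n then PySem.List.pyGetD rois (shelt + 1) "" else PySem.List.pyGetD rois shelt ""
    let threat_arm : String :=
      if 0 < thrt then PySem.List.pyGetD rois (thrt - 1) "" else PySem.List.pyGetD rois (n - 1) ""
    (some shelt, some thrt, some shelt_arm, some threat_arm)
  else
    let st := pvInScan rois 0 none
    let thrt : Int := match st.1, st.2 with
      | some _, some t => t + 1
      | _, _ => n - 1
    let threat_arm : String := PySem.List.pyGetD rois thrt ""
    match st.1 with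
    | some fs =>
        let shelt_arm : String :=
          if 0 < fs then PySem.List.pyGetD rois (fs - 1) "" else PySem.List.pyGetD rois (n - 1) ""
        (some fs, some thrt, some shelt_arm, some threat_arm)
    | none => (none, some thrt, none, some threat_arm)

-- ===== PRECONDITION & SPEC =====
-- Pre_ excludes rois = [] (Python A raises IndexError there, in both branches) and the
-- inward calls with no "Shelter_platform" in rois, on which A returns the booleans
-- (False, ..., False, ...) — values outside the declared Optional[int]/Optional[str] type
def Pre_get_arms_of_originandescape (rois : List String) (outward : Bool) : Prop :=
  rois ≠ [] ∧ (outward = true ∨ "Shelter_platform" ∈ rois)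
instance (rois : List String) (outward : Bool) : Decidable (Pre_get_arms_of_originandescape rois outward) := by unfold Pre_get_arms_of_originandescape; infer_instance
def pvWitness_get_arms_of_originandescape : List String × Bool := (["Shelter_platform", "arm", "Threat_platform"], true)

def Spec_get_arms_of_originandescape (rois : List String) (outward : Bool) (out : Option Int × Option Int × Option String × Option String) : Prop := out = get_arms_of_originandescape_alt rois outward
instance (rois : List String) (outward : Bool) (out : Option Int × Option Int × Option String × Option String) : Decidable (Spec_get_arms_of_originandescape rois outward out) := by unfold Spec_get_arms_of_originandescape; infer_instance

-- ===== CLAIM (what is proved, stated in full; the proofs are below) =====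
def Claim_equal_get_arms_of_originandescape : Prop := ∀ (rois : List String) (outward : Bool), Dom_get_arms_of_originandescape rois outward → Pre_get_arms_of_originandescape rois outward → Spec_get_arms_of_originandescape rois outward (get_arms_of_originandescape rois outward)

-- ===== LEMMAS AND PROOFS =====

-- last index of v in l (proof-side characterisation of A's "[-1] of the comprehension"
-- and of what B's passes record)
def pvLast (v : String) : List String → Option Nat
  | [] => none
  | x :: r =>
    match pvLast v r with
    | some k => some (k + 1)
    | none => if x == v then some 0 else none

theorem pvLast_lt (v : String) (l : List String) (k : Nat) (h : pvLast v l = some k) :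
    k < l.length ∧ l[k]? = some v := by
  induction l generalizing k with
  | nil => simp [pvLast] at h
  | cons x r ih =>
    rw [pvLast] at h
    cases hr : pvLast v r with
    | some j =>
      rw [hr] at h
      obtain ⟨hj, hget⟩ := ih j hr
      simp only [Option.some.injEq] at h
      subst h
      refine ⟨by simpa using Nat.succ_lt_succ hj, ?_⟩
      simpa using hget
    | none =>
      rw [hr] at h
      by_cases hx : x = v
      · simp [hx] at h
        subst h
        simp [hx]
      · simp [hx] at h

-- A's "[i for i, x in enumerate(l, s) if x == v][-1]" is pvLast
theorem getLast_filter_enumerate (v : String) (l : List String) (s : Int) :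
    (((PySem.List.enumerate l s).filter (fun p => p.2 == v)).map (fun p => p.1)).getLast?
      = (pvLast v l).map (fun k : Nat => s + (k : Int)) := by
  induction l generalizing s with
  | nil => simp [PySem.List.enumerate_nil, pvLast]
  | cons x r ih =>
    rw [PySem.List.enumerate_cons, pvLast]
    by_cases hx : x = v
    · simp only [List.filter_cons, hx, BEq.rfl, if_pos, List.map_cons, List.getLast?_cons,
        ih (s + 1)]
      cases hr : pvLast v r with
      | some j =>
        simp only [Option.map_some, Option.getD_some, Option.some.injEq]
        push_cast
        ring
      | none => simp
    · have hb : ((s, x).2 == v) = false := by simpa using hx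
      simp only [List.filter_cons, hb, Bool.false_eq_true, reduceIte]
      rw [ih (s + 1)]
      cases hr : pvLast v r with
      | some j =>
        simp only [Option.map_some, Option.some.injEq]
        push_cast
        ring
      | none => simp

-- characterisation of B's outward fold
theorem outfold_char (l : List String) (s : Int) (ls ta : Option Int) :
    (PySem.List.enumerate l s).foldl pvOutStep (ls, ta)
      = match pvLast "Shelter_platform" l with
        | some k => (some (s + (k : Int)),
            (PySem.List.index? (l.drop (k + 1)) "Threat_platform").map
              (fun j : Nat => s + (k : Int) + 1 + (j : Int)))
        | none =>
            (ls, match ta with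
                 | some t => some t
                 | none => (PySem.List.index? l "Threat_platform").map (fun j : Nat => s + (j : Int))) := by
  induction l generalizing s ls ta with
  | nil =>
    cases ta <;> simp [PySem.List.enumerate_nil, pvLast]
  | cons x r ih =>
    rw [PySem.List.enumerate_cons, pvLast, List.foldl_cons]
    by_cases hS : x = "Shelter_platform"
    · subst hS
      rw [show pvOutStep (ls, ta) (s, "Shelter_platform") = (some s, none) from by
        simp [pvOutStep], ih]
      cases hr : pvLast "Shelter_platform" r with
      | some k =>
        simp only [List.drop_succ_cons]
        push_cast
        ring_nf
      | none =>
        simp only [BEq.rfl, reduceIte, List.drop_succ_cons, List.drop_zero]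
        push_cast
        ring_nf
    · have hxb : (x == "Shelter_platform") = false := by simpa using hS
      by_cases hT : x = "Threat_platform"
      · subst hT
        cases ta with
        | none =>
          rw [show pvOutStep (ls, none) (s, "Threat_platform") = (ls, some s) from by
            simp [pvOutStep, hxb], ih]
          cases hr : pvLast "Shelter_platform" r with
          | some k =>
            simp only [List.drop_succ_cons]
            push_cast
            ring_nf
          | none =>
            simp only [hxb, Bool.false_eq_true, reduceIte, PySem.List.index?_cons_self]
            simp
        | some t =>
          rw [show pvOutStep (ls, some t) (s, "Threat_platform") = (ls, some t) from by
            simp [pvOutStep, hxb], ih]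
          cases hr : pvLast "Shelter_platform" r with
          | some k =>
            simp only [List.drop_succ_cons]
            push_cast
            ring_nf
          | none => simp [hxb]
      · have hstep : pvOutStep (ls, ta) (s, x) = (ls, ta) := by
          cases ta <;> simp [pvOutStep, hxb, hT]
        rw [hstep, ih]
        cases hr : pvLast "Shelter_platform" r with
        | some k =>
          simp only [List.drop_succ_cons]
          push_cast
          ring_nf
        | none =>
          cases ta with
          | some t => simp [hxb]
          | none =>
            simp only [hxb, Bool.false_eq_true, reduceIte]
            rw [PySem.List.index?_cons_of_ne _ (by simpa using hT)]
            cases hq : PySem.List.index? r "Threat_platform" with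
            | none => simp
            | some j =>
              simp only [Option.map_some, Prod.mk.injEq, Option.some.injEq]
              constructor
              · trivial
              · omega

-- characterisation of B's inward scan (early break at the first shelter)
theorem inscan_char (l : List String) (s : Int) (lt : Option Int) :
    pvInScan l s lt
      = match PySem.List.index? l "Shelter_platform" with
        | some k => (some (s + (k : Int)),
            match pvLast "Threat_platform" (l.take k) with
            | some j => some (s + (j : Int))
            | none => lt)
        | none =>
            (none, match pvLast "Threat_platform" l with
                   | some j => some (s + (j : Int))
                   | none => lt) := by
  induction l generalizing s lt with
  | nil => simp [pvInScan, PySem.List.index?, pvLast]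
  | cons x r ih =>
    rw [pvInScan]
    by_cases hS : x = "Shelter_platform"
    · subst hS
      rw [if_pos (by simp), PySem.List.index?_cons_self]
      simp [pvLast]
    · rw [if_neg (by simpa using hS), ih,
        PySem.List.index?_cons_of_ne _ (by simpa using hS)]
      cases hr : PySem.List.index? r "Shelter_platform" with
      | some k =>
        simp only [Option.map_some, List.take_succ_cons, pvLast]
        cases hj : pvLast "Threat_platform" (r.take k) with
        | some j =>
          simp only []
          push_cast
          ring_nf
        | none =>
          by_cases hT : x = "Threat_platform"
          · simp only [hT, BEq.rfl, reduceIte]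
            push_cast
            ring_nf
          · have hxb : (x == "Threat_platform") = false := by simpa using hT
            simp only [hxb, Bool.false_eq_true, reduceIte]
            push_cast
            ring_nf
      | none =>
        simp only [Option.map_none, pvLast]
        cases hj : pvLast "Threat_platform" r with
        | some j =>
          simp only []
          push_cast
          ring_nf
        | none =>
          by_cases hT : x = "Threat_platform"
          · simp [hT]
          · have hxb : (x == "Threat_platform") = false := by simpa using hT
            simp [hxb]

-- rois[-1] = rois[len-1] on a nonempty list
theorem pyGetD_neg_one_eq_last (l : List String) (h : l ≠ []) :
    PySem.List.pyGetD l (-1) "" = PySem.List.pyGetD l ((l.length : Int) - 1) "" := by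
  rw [PySem.List.pyGetD_neg_one l "" h]
  have hlen : 0 < l.length := List.length_pos_iff.mpr h
  rw [PySem.List.pyGetD_eq_getElem l "" (by omega) (by omega)]
  rw [List.getLast_eq_getElem]
  congr 1
  omega

-- A's try rois[k+1] / except rois[k] is B's bounds test (k a valid index)
theorem arm_next_eq (l : List String) (k : Nat) (hk : k < l.length) :
    (match PySem.List.pyGet? l ((k : Int) + 1) with
     | some v => v
     | none => PySem.List.pyGetD l (k : Int) "")
      = (if (k : Int) + 1 < (l.length : Int) then PySem.List.pyGetD l ((k : Int) + 1) ""
         else PySem.List.pyGetD l (k : Int) "") := by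
  rw [PySem.List.pyGet?_of_nonneg l (by omega)]
  by_cases hlt : k + 1 < l.length
  · have h1 : ((k : Int) + 1).toNat = k + 1 := by omega
    rw [h1, List.getElem?_eq_getElem hlt, if_pos (by omega)]
    show l[k + 1] = PySem.List.pyGetD l ((k : Int) + 1) ""
    rw [PySem.List.pyGetD_eq_getElem l "" (by omega) (by omega)]
    congr 1
  · have h1 : l[((k : Int) + 1).toNat]? = none := by
      rw [List.getElem?_eq_none_iff]
      omega
    rw [h1, if_neg (by omega)]

-- A's rois[k-1] (wrapping to the end at k = 0) is B's 0 < k test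
theorem arm_prev_eq (l : List String) (h : l ≠ []) (k : Nat) :
    PySem.List.pyGetD l ((k : Int) - 1) ""
      = (if 0 < (k : Int) then PySem.List.pyGetD l ((k : Int) - 1) ""
         else PySem.List.pyGetD l ((l.length : Int) - 1) "") := by
  by_cases hk : 0 < (k : Int)
  · rw [if_pos hk]
  · have h0 : (k : Int) - 1 = -1 := by omega
    rw [if_neg hk, h0, pyGetD_neg_one_eq_last l h]

theorem get_arms_of_originandescape_spec : Claim_equal_get_arms_of_originandescape := by
  intro rois outward _hdom hpre
  obtain ⟨hne, hout⟩ := hpre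
  have hlen : 0 < rois.length := List.length_pos_iff.mpr hne
  unfold Spec_get_arms_of_originandescape
  cases outward with
  | true =>
    simp only [get_arms_of_originandescape, get_arms_of_originandescape_alt, if_true]
    rw [getLast_filter_enumerate, outfold_char]
    cases hls : pvLast "Shelter_platform" rois with
    | some k =>
      obtain ⟨hk, hget⟩ := pvLast_lt _ _ _ hls
      have hgetk : rois[k] = "Shelter_platform" := by
        have := List.getElem?_eq_some_iff.mp hget
        obtain ⟨h', hv⟩ := this
        exact hv
      have hdrop : rois.drop k = "Shelter_platform" :: rois.drop (k + 1) := by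
        rw [List.drop_eq_getElem_cons hk, hgetk]
      simp only [Option.map_some, zero_add, Option.getD_some]
      rw [PySem.List.slice_from_natCast, hdrop]
      rw [PySem.List.index?_cons_of_ne _ (by decide)]
      have hmemS : ("Threat_platform" ∈ "Shelter_platform" :: rois.drop (k + 1))
          ↔ "Threat_platform" ∈ rois.drop (k + 1) := by simp
      cases hq : PySem.List.index? (rois.drop (k + 1)) "Threat_platform" with
      | some j =>
        have hmem : "Threat_platform" ∈ rois.drop (k + 1) := by
          rw [← PySem.List.index?_isSome_iff, hq]; rfl
        rw [if_pos (hmemS.mpr hmem)]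
        simp only [Option.map_some, Option.getD_some]
        have e1 : ((j + 1 : Nat) : Int) + (k : Int) = (k : Int) + 1 + (j : Int) := by
          push_cast; ring
        rw [e1, arm_next_eq rois k hk]
        have e2 : (0 : Int) < (k : Int) + 1 + (j : Int) := by omega
        rw [if_pos e2]
      | none =>
        have hmem : "Threat_platform" ∉ rois.drop (k + 1) := by
          rw [← PySem.List.index?_eq_none_iff]; exact hq
        rw [if_neg (by simpa using hmem)]
        simp only [Option.map_none, Option.getD_none]
        rw [arm_next_eq rois k hk]
        rw [if_neg (show ¬ (0 : Int) < 0 by omega)]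
        rw [show (0 : Int) - 1 = -1 by norm_num, pyGetD_neg_one_eq_last rois hne]
    | none =>
      simp only [Option.map_none, Option.getD_none]
      have h0 : PySem.List.slice rois (some 0) none = rois := by
        have := PySem.List.slice_from_natCast rois 0
        simpa using this
      rw [h0]
      cases hq : PySem.List.index? rois "Threat_platform" with
      | some j =>
        have hmem : "Threat_platform" ∈ rois := by
          rw [← PySem.List.index?_isSome_iff, hq]; rfl
        rw [if_pos hmem]
        simp only [Option.map_some, Option.getD_some, zero_add, add_zero]
        have e1 := arm_next_eq rois 0 hlen
        simp only [Nat.cast_zero, zero_add] at e1 ⊢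
        rw [e1]
        by_cases hj : (0 : Int) < (j : Int)
        · rw [if_pos hj]
        · have hj0 : (j : Int) = 0 := by omega
          rw [if_neg hj, hj0]
          rw [show (0 : Int) - 1 = -1 by norm_num, pyGetD_neg_one_eq_last rois hne]
      | none =>
        have hmem : "Threat_platform" ∉ rois := by
          rw [← PySem.List.index?_eq_none_iff]; exact hq
        rw [if_neg hmem]
        simp only [Option.map_none, Option.getD_none]
        have e1 := arm_next_eq rois 0 hlen
        simp only [Nat.cast_zero, zero_add] at e1 ⊢
        rw [e1]
        rw [if_neg (show ¬ (0 : Int) < 0 by omega)]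
        rw [show (0 : Int) - 1 = -1 by norm_num, pyGetD_neg_one_eq_last rois hne]
  | false =>
    simp only [get_arms_of_originandescape, get_arms_of_originandescape_alt,
      Bool.false_eq_true, if_false]
    rw [inscan_char]
    cases hq : PySem.List.index? rois "Shelter_platform" with
    | some k =>
      have hmem : "Shelter_platform" ∈ rois := by
        rw [← PySem.List.index?_isSome_iff, hq]; rfl
      rw [if_pos hmem]
      simp only [zero_add]
      rw [PySem.List.slice_to_natCast, getLast_filter_enumerate]
      rw [show (if 0 < (k : Int) then PySem.List.pyGetD rois ((k : Int) - 1) ""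
            else PySem.List.pyGetD rois ((rois.length : Int) - 1) "")
          = PySem.List.pyGetD rois ((k : Int) - 1) "" from (arm_prev_eq rois hne k).symm]
      cases hj : pvLast "Threat_platform" (rois.take k) with
      | some j => simp
      | none => simp
    | none =>
      have hmem : "Shelter_platform" ∉ rois := by
        rw [← PySem.List.index?_eq_none_iff]; exact hq
      have hmem' : "Shelter_platform" ∈ rois := by
        rcases hout with h | h
        · exact absurd h (by simp)
        · exact h
      exact absurd hmem' hmem
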